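-- pv_equiv track=rewrite | github.com/kianaseraj/DeepPPI | utils.py | calculate_class_lengths
-- ===== SOURCE A (Python) =====
-- import math
--
-- def calculate_class_lengths(encoding, target_class):
--     """
--     Internal function for distribution descriptor.
--
--     Returns the position (1-based) of the first, 25%, 50%, 75%, and 100% occurrence of a class.
--     """
--     positions = [i for i, char in enumerate(encoding) if char == target_class]
--     if not positions:
--         return [0] * 5
--
--     n = len(positions)
--     return [
--         positions[0]+1,
--         positions[min(math.ceil(n*0.25)-1, n-1)]+1,
--         positions[min(math.ceil(n*0.50)-1, n-1)]+1,
--         positions[min(math.ceil(n*0.75)-1, n-1)]+1,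
--         positions[-1]+1
--     ]
-- ===== SOURCE B (Python) =====
-- def calculate_class_lengths(encoding, target_class):
--     # Count matches first; then one pass filling the five percentile slots
--     # with a running match counter, never materializing the positions list.
--     n = sum(1 for ch in encoding if ch == target_class)
--     if n == 0:
--         return [0] * 5
--     ranks = [0, (n + 3) // 4 - 1, (n + 1) // 2 - 1, (3 * n + 3) // 4 - 1, n - 1]
--     out = [0] * 5
--     c = 0
--     for i, ch in enumerate(encoding):
--         if ch == target_class:
--             for j, r in enumerate(ranks):
--                 if r == c:
--                     out[j] = i + 1
--             c += 1
--     return out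
-- ===== Notes on version B (the rewrite author's own statement) =====
-- stated objective: alternative
-- what changed: Instead of materializing the full positions list and indexing into it with float-ceil percentile formulas, B counts the matches, derives the five integer target ranks, and fills the five slots during a single indexed pass with a running match counter.
import Mathlib
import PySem

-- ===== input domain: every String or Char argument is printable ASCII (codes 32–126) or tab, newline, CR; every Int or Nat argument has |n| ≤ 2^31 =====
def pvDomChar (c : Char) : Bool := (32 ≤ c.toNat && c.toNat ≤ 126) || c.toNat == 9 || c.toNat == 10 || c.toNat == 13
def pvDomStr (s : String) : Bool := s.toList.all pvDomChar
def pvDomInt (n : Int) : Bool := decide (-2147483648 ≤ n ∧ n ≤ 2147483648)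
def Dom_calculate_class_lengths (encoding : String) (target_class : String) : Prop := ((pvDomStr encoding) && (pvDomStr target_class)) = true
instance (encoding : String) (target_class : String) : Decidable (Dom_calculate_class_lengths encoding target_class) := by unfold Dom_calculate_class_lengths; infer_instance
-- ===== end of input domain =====

-- B changes the decomposition: instead of materializing the positions list and indexing it,
-- B counts the matches, derives the five target ranks, and fills the slots in one indexed pass
-- with a running match counter (objective: alternative; same asymptotic cost, no positions list).

-- ===== PORT A =====
-- math.ceil(n*0.25), math.ceil(n*0.50), math.ceil(n*0.75) are ported exactly as
-- ⌈n/4⌉ = (n+3)/4, ⌈n/2⌉ = (n+1)/2, ⌈3n/4⌉ = (3n+3)/4: the float products n*0.25, n*0.5,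
-- n*0.75 are exact binary floats for every list length reachable here, so Python's ceil of
-- them equals these integer ceilings. positions[...] is ported with List.getD 0: every index
-- used is provably in range (0 ≤ idx ≤ n-1 with positions nonempty), so Python never raises
-- and the default is never taken; positions[-1] is positions[n-1] on a nonempty list.
def calculate_class_lengths (encoding : String) (target_class : String) : List Int :=
  let positions : List Int :=
    (PySem.List.enumerate encoding.toList).filterMap
      (fun p => if String.ofList [p.2] = target_class then some p.1 else none)
  if positions.isEmpty then [0, 0, 0, 0, 0]
  else
    let n : Nat := positions.length
    [ positions.getD 0 0 + 1,
      positions.getD (min ((n + 3) / 4 - 1) (n - 1)) 0 + 1,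
      positions.getD (min ((n + 1) / 2 - 1) (n - 1)) 0 + 1,
      positions.getD (min ((3 * n + 3) / 4 - 1) (n - 1)) 0 + 1,
      positions.getD (n - 1) 0 + 1 ]

-- ===== PORT B =====
-- sum(1 for ch in encoding if ch == target_class) is ported as countP; the i,ch loop is a
-- foldl over enumerate carrying (out, counter); the inner j,r loop over ranks is the map
-- over ranks.zip(out). The integer rank formulas are Source B's own (see Source B).
def calculate_class_lengths_alt (encoding : String) (target_class : String) : List Int :=
  let n : Nat := encoding.toList.countP (fun ch => String.ofList [ch] = target_class)
  if n = 0 then [0, 0, 0, 0, 0]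
  else
    let ranks : List Nat := [0, (n + 3) / 4 - 1, (n + 1) / 2 - 1, (3 * n + 3) / 4 - 1, n - 1]
    let st :=
      (PySem.List.enumerate encoding.toList).foldl
        (fun (st : List Int × Nat) p =>
          if String.ofList [p.2] = target_class then
            ((ranks.zip st.1).map (fun q => if q.1 = st.2 then p.1 + 1 else q.2), st.2 + 1)
          else st)
        ([0, 0, 0, 0, 0], 0)
    st.1

-- ===== PRECONDITION & SPEC =====
def Spec_calculate_class_lengths (encoding : String) (target_class : String) (out : List Int) : Prop := out = calculate_class_lengths_alt encoding target_class
instance (encoding : String) (target_class : String) (out : List Int) : Decidable (Spec_calculate_class_lengths encoding target_class out) := by unfold Spec_calculate_class_lengths; infer_instance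

-- ===== CLAIM (what is proved, stated in full; the proofs are below) =====
def Claim_equal_calculate_class_lengths : Prop := ∀ (encoding : String) (target_class : String), Dom_calculate_class_lengths encoding target_class → Spec_calculate_class_lengths encoding target_class (calculate_class_lengths encoding target_class)

-- ===== LEMMAS AND PROOFS =====

-- the list of (Int) indices of matching characters in l, first index s
def pvPos (tc : String) (s : Int) : List Char → List Int
  | [] => []
  | c :: l => if String.ofList [c] = tc then s :: pvPos tc (s + 1) l else pvPos tc (s + 1) l

theorem pvPos_eq_filterMap (tc : String) (l : List Char) (s : Int) :
    (PySem.List.enumerate l s).filterMap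
      (fun p => if String.ofList [p.2] = tc then some p.1 else none) = pvPos tc s l := by
  induction l generalizing s with
  | nil => simp [PySem.List.enumerate_nil, pvPos]
  | cons c l ih =>
    rw [PySem.List.enumerate_cons]
    simp only [List.filterMap_cons, pvPos]
    split_ifs <;> simp [ih]

theorem pvPos_length_eq_countP (tc : String) (l : List Char) (s : Int) :
    (pvPos tc s l).length = l.countP (fun ch => String.ofList [ch] = tc) := by
  induction l generalizing s with
  | nil => simp [pvPos]
  | cons c l ih =>
    simp only [pvPos, List.countP_cons]
    by_cases h : String.ofList [c] = tc <;> simp [h, ih]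

-- one output slot across one matching step: composing "write s+1 where rank = c" with the
-- suffix characterization equals the characterization with s consed on
theorem pvSlot (P : List Int) (s : Int) (c r : Nat) (o : Int) :
    (if c + 1 ≤ r ∧ r < c + 1 + P.length then P.getD (r - (c + 1)) 0 + 1
     else if r = c then s + 1 else o)
    = (if c ≤ r ∧ r < c + (P.length + 1) then (s :: P).getD (r - c) 0 + 1 else o) := by
  by_cases hrc : r = c
  · subst hrc
    rw [if_neg (by omega), if_pos rfl, if_pos (by omega)]
    simp
  · by_cases hin : c + 1 ≤ r ∧ r < c + 1 + P.length
    · rw [if_pos hin, if_pos (by omega)]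
      have hk : r - c = r - (c + 1) + 1 := by omega
      rw [hk, List.getD_cons_succ]
    · rw [if_neg hin, if_neg hrc, if_neg (by omega)]

-- loop invariant for B's fold: after the whole suffix is processed, slot j holds
-- pos[r-c]+1 for its rank r if r falls among this suffix's matches, else its old value
theorem pvFold_char (tc : String) (rs : List Nat) (l : List Char) (s : Int)
    (out : List Int) (c : Nat) (hlen : out.length = rs.length) :
    (PySem.List.enumerate l s).foldl
      (fun (st : List Int × Nat) p =>
        if String.ofList [p.2] = tc then
          ((rs.zip st.1).map (fun q => if q.1 = st.2 then p.1 + 1 else q.2), st.2 + 1)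
        else st)
      (out, c)
    = ((rs.zip out).map (fun q =>
          if c ≤ q.1 ∧ q.1 < c + (pvPos tc s l).length
          then (pvPos tc s l).getD (q.1 - c) 0 + 1 else q.2),
       c + (pvPos tc s l).length) := by
  induction l generalizing s out c with
  | nil =>
    simp only [PySem.List.enumerate_nil, List.foldl_nil, pvPos, List.length_nil, Nat.add_zero]
    rw [Prod.mk.injEq]
    refine ⟨?_, rfl⟩
    refine (List.ext_getElem (by simp [hlen]) ?_).symm
    intro j h1 h2
    simp only [List.getElem_map, List.getElem_zip]
    rw [if_neg (by omega)]
  | cons x l ih =>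
    rw [PySem.List.enumerate_cons, List.foldl_cons]
    by_cases hm : String.ofList [x] = tc
    · rw [if_pos hm]
      rw [ih (s + 1) _ (c + 1) (by simp [hlen])]
      simp only [pvPos, if_pos hm, List.length_cons]
      rw [Prod.mk.injEq]
      refine ⟨?_, by omega⟩
      apply List.ext_getElem
      · simp [hlen]
      intro j h1 h2
      simp only [List.getElem_map, List.getElem_zip]
      exact pvSlot _ _ _ _ _
    · rw [if_neg hm]
      rw [ih (s + 1) out c hlen]
      simp only [pvPos, if_neg hm]

-- ===== VERDICT (by name: the statement is the Claim_ definition above) =====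
theorem calculate_class_lengths_spec : Claim_equal_calculate_class_lengths := by
  intro encoding target_class _
  unfold Spec_calculate_class_lengths calculate_class_lengths calculate_class_lengths_alt
  simp only [pvPos_eq_filterMap]
  rw [← pvPos_length_eq_countP target_class encoding.toList 0]
  by_cases h0 : (pvPos target_class 0 encoding.toList).length = 0
  · simp [List.length_eq_zero_iff.mp h0]
  · rw [if_neg (by simp only [List.isEmpty_iff]; exact fun h => h0 (by simp [h])), if_neg h0]
    rw [pvFold_char target_class _ encoding.toList 0 [0, 0, 0, 0, 0] 0 (by simp)]
    set m := (pvPos target_class 0 encoding.toList).length with hm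
    simp only [List.zip_cons_cons, List.zip_nil_right, List.map_cons, List.map_nil,
      Nat.zero_add]
    rw [if_pos (by omega), if_pos (by omega), if_pos (by omega), if_pos (by omega),
      if_pos (by omega)]
    simp only [Nat.sub_zero]
    rw [min_eq_left (by omega), min_eq_left (by omega), min_eq_left (by omega)]
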